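-- pv_equiv track=rewrite | github.com/Park-youngjun/KimTowPark | Vulnerable_Library_Security_Action_Programs/main.py | _pick_min_fixed
-- ===== SOURCE A (Python) =====
-- def _pick_min_fixed(affected_obj):
--     cands = []
--     for r in (affected_obj.get("ranges") or []):
--         for ev in r.get("events", []):
--             if "fixed" in ev:
--                 cands.append(ev["fixed"])
--     # 문자열 비교로 충분(버전 정렬 정확도는 낮지만 안내용으로 OK)
--     cands = [c for c in cands if c]
--     return sorted(cands)[0] if cands else None
-- ===== SOURCE B (Python) =====
-- def _pick_min_fixed(affected_obj):
--     # recursive decomposition: per-range minimum merged back-to-front, no list, no sort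
--     def merge(a, b):
--         if a is None:
--             return b
--         if b is None:
--             return a
--         return a if a <= b else b
--
--     def events_min(evs):
--         if not evs:
--             return None
--         c = evs[0].get("fixed")
--         return merge(c if c else None, events_min(evs[1:]))
--
--     def ranges_min(rs):
--         if not rs:
--             return None
--         return merge(ranges_min(rs[1:]), events_min(rs[0].get("events", [])))
--
--     return ranges_min(affected_obj.get("ranges") or [])
-- ===== Notes on version B (the rewrite author's own statement) =====
-- stated objective: alternative
-- what changed: Replaced the collect-candidates / filter / sort-then-take-first pipeline with a recursive decomposition: a per-events recursive minimum and a per-ranges recursion merged back-to-front through an Option-min 'merge', never building a candidate list or sorting.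
import Mathlib
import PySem

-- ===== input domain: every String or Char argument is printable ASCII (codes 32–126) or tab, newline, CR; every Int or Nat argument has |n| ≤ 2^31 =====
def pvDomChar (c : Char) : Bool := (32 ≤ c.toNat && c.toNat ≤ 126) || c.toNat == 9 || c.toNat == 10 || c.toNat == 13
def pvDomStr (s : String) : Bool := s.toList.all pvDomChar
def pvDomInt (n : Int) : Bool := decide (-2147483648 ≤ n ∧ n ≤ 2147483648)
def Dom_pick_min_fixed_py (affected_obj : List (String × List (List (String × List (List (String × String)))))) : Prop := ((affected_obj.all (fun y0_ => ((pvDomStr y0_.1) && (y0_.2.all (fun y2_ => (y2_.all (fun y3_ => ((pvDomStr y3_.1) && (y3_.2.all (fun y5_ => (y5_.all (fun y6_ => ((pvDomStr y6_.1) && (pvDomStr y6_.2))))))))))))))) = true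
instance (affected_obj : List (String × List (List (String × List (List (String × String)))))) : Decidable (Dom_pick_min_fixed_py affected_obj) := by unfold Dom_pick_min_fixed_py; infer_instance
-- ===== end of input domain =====

-- B replaces A's collect-filter-sort-take-first pipeline with a recursive back-to-front
-- Option-min merge (objective: alternative decomposition).

-- ===== PORT A =====
def pick_min_fixed_py (affected_obj : List (String × List (List (String × List (List (String × String)))))) : Option String :=
  -- affected_obj.get("ranges") or []
  let ranges := match (PySem.Dict.mk affected_obj).get? "ranges" with
    | none => []
    | some l => if l = [] then [] else l
  -- cands = []; for r in ranges: for ev in r.get("events", []): if "fixed" in ev: cands.append(ev["fixed"])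
  let cands := ranges.foldl (fun acc r =>
      ((PySem.Dict.mk r).getD "events" []).foldl (fun acc2 ev =>
        if (PySem.Dict.mk ev).contains "fixed" then
          acc2 ++ [((PySem.Dict.mk ev).get? "fixed").getD ""] else acc2) acc) []
  -- cands = [c for c in cands if c]; return sorted(cands)[0] if cands else None
  let cands2 := cands.filter (fun c => decide (c ≠ ""))
  if cands2 ≠ [] then (PySem.List.sorted cands2 (fun x => x) false).head? else none

-- ===== PORT B =====
-- merge(a, b): Option-min of two optional strings (Source B's merge)
def pvMerge (a b : Option String) : Option String :=
  match a with
  | none => b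
  | some x =>
    match b with
    | none => some x
    | some y => if x ≤ y then some x else some y

-- events_min(evs): recursive minimum over one range's events (Source B's events_min)
def pvEventsMin : List (List (String × String)) → Option String
  | [] => none
  | ev :: rest =>
    pvMerge
      (match (PySem.Dict.mk ev).get? "fixed" with
       | none => none
       | some c => if c = "" then none else some c)
      (pvEventsMin rest)

-- ranges_min(rs): back-to-front recursion merging each range's events_min (Source B's ranges_min)
def pvRangesMin : List (List (String × List (List (String × String)))) → Option String
  | [] => none
  | r :: rest => pvMerge (pvRangesMin rest) (pvEventsMin ((PySem.Dict.mk r).getD "events" []))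

def pick_min_fixed_py_alt (affected_obj : List (String × List (List (String × List (List (String × String)))))) : Option String :=
  pvRangesMin (match (PySem.Dict.mk affected_obj).get? "ranges" with
    | none => []
    | some l => if l = [] then [] else l)

-- ===== PRECONDITION & SPEC =====
def Spec_pick_min_fixed_py (affected_obj : List (String × List (List (String × List (List (String × String)))))) (out : Option String) : Prop := out = pick_min_fixed_py_alt affected_obj
instance (affected_obj : List (String × List (List (String × List (List (String × String)))))) (out : Option String) : Decidable (Spec_pick_min_fixed_py affected_obj out) := by unfold Spec_pick_min_fixed_py; infer_instance

-- ===== CLAIM (what is proved, stated in full; the proofs are below) =====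
def Claim_equal_pick_min_fixed_py : Prop := ∀ (affected_obj : List (String × List (List (String × List (List (String × String)))))), Dom_pick_min_fixed_py affected_obj → Spec_pick_min_fixed_py affected_obj (pick_min_fixed_py affected_obj)

-- ===== LEMMAS AND PROOFS =====

-- the candidate an event contributes, and all candidates a range contributes (A's collection)
abbrev pvVal (ev : List (String × String)) : String := ((PySem.Dict.mk ev).get? "fixed").getD ""

abbrev pvG (r : List (String × List (List (String × String)))) : List String :=
  (((PySem.Dict.mk r).getD "events" []).filter
      (fun ev => (PySem.Dict.mk ev).contains "fixed")).map pvVal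

-- the shared meaning: minimum of the nonempty candidates
abbrev pvMn (l : List String) : Option String := (l.filter (fun c => decide (c ≠ ""))).min?

theorem pv_contains_eq_isSome (ev : List (String × String)) :
    (PySem.Dict.mk ev).contains "fixed" = ((PySem.Dict.mk ev).get? "fixed").isSome := by
  show (ev.any fun p => p.1 == "fixed")
      = (Option.map (fun x => x.2) (List.find? (fun p => p.1 == "fixed") ev)).isSome
  induction ev with
  | nil => rfl
  | cons p t ih =>
    cases hp : (p.1 == "fixed") with
    | false => simpa [List.any_cons, hp] using ih
    | true => simp [List.any_cons, hp]

-- A's nested collection loop builds exactly the flatMap of pvG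
theorem pv_outerA (ranges : List (List (String × List (List (String × String))))) (acc : List String) :
    ranges.foldl (fun acc r =>
      ((PySem.Dict.mk r).getD "events" []).foldl (fun acc2 ev =>
        if (PySem.Dict.mk ev).contains "fixed" then
          acc2 ++ [((PySem.Dict.mk ev).get? "fixed").getD ""] else acc2) acc) acc
    = acc ++ ranges.flatMap pvG := by
  induction ranges generalizing acc with
  | nil => simp
  | cons r t ih =>
    simp only [List.foldl_cons]
    rw [PySem.List.foldl_append_if (fun ev => (PySem.Dict.mk ev).contains "fixed") pvVal,
      ih, List.flatMap_cons, List.append_assoc]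

-- running foldl min can be peeled off the seed
theorem pv_foldl_min_init (s : List String) (a b : String) :
    s.foldl min (min a b) = min a (s.foldl min b) := by
  induction s generalizing b with
  | nil => rfl
  | cons c s ih => simp only [List.foldl_cons, min_assoc, ih]

-- pvMerge of two list minima is the minimum of the concatenation
theorem pv_merge_min? (l1 l2 : List String) :
    pvMerge l1.min? l2.min? = (l1 ++ l2).min? := by
  cases l1 with
  | nil => cases l2 <;> rfl
  | cons x t =>
    cases l2 with
    | nil => simp [List.min?, pvMerge]
    | cons y s =>
      show (if t.foldl min x ≤ s.foldl min y then some (t.foldl min x) else some (s.foldl min y))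
          = ((x :: t) ++ y :: s).min?
      have h0 : ((x :: t) ++ y :: s).min? = some ((t ++ y :: s).foldl min x) := rfl
      rw [h0, List.foldl_append, List.foldl_cons, pv_foldl_min_init]
      by_cases h : t.foldl min x ≤ s.foldl min y
      · rw [if_pos h, min_eq_left h]
      · rw [if_neg h, min_eq_right ((not_le.mp h).le)]

theorem pv_merge_comm (a b : Option String) : pvMerge a b = pvMerge b a := by
  cases a with
  | none => cases b <;> rfl
  | some x =>
    cases b with
    | none => rfl
    | some y =>
      show (if x ≤ y then some x else some y) = (if y ≤ x then some y else some x)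
      by_cases h : x ≤ y <;> by_cases h2 : y ≤ x
      · rw [if_pos h, if_pos h2, le_antisymm h h2]
      · rw [if_pos h, if_neg h2]
      · rw [if_neg h, if_pos h2]
      · exact absurd ((not_le.mp h).le) h2

theorem pv_merge_pvMn (l1 l2 : List String) :
    pvMerge (pvMn l1) (pvMn l2) = pvMn (l1 ++ l2) := by
  simp only [pvMn, List.filter_append]
  exact pv_merge_min? _ _

-- B's events recursion computes the minimum of that range's nonempty candidates
theorem pv_eventsMin (evs : List (List (String × String))) :
    pvEventsMin evs = pvMn ((evs.filter (fun ev => (PySem.Dict.mk ev).contains "fixed")).map pvVal) := by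
  induction evs with
  | nil => rfl
  | cons ev t ih =>
    rw [pvEventsMin, ih, List.filter_cons]
    cases h : (PySem.Dict.mk ev).get? "fixed" with
    | none =>
      have hc : (PySem.Dict.mk ev).contains "fixed" = false := by
        rw [pv_contains_eq_isSome, h]; rfl
      simp [hc, pvMerge]
    | some c =>
      have hc : (PySem.Dict.mk ev).contains "fixed" = true := by
        rw [pv_contains_eq_isSome, h]; rfl
      have hv : pvVal ev = c := by show ((PySem.Dict.mk ev).get? "fixed").getD "" = c; rw [h]; rfl
      have hhead : (if c = "" then none else some c) = pvMn [c] := by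
        by_cases hce : c = "" <;> simp [pvMn, List.min?, hce]
      have hfil : (fun ev => (PySem.Dict.mk ev).contains "fixed") ev = true := hc
      show pvMerge (if c = "" then none else some c)
          (pvMn ((t.filter (fun ev => (PySem.Dict.mk ev).contains "fixed")).map pvVal)) = _
      rw [if_pos hfil, List.map_cons, hv, hhead, pv_merge_pvMn, List.singleton_append]

-- B's ranges recursion computes the minimum of all the nonempty candidates
theorem pv_rangesMin (rs : List (List (String × List (List (String × String))))) :
    pvRangesMin rs = pvMn (rs.flatMap pvG) := by
  induction rs with
  | nil => rfl
  | cons r t ih =>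
    rw [pvRangesMin, ih, pv_eventsMin, pv_merge_comm, pv_merge_pvMn, List.flatMap_cons]

-- A's sorted-head of the nonempty-filtered candidates is the same minimum
theorem pv_sorted_head (l : List String) :
    (if l.filter (fun c => decide (c ≠ "")) ≠ [] then
        (PySem.List.sorted (l.filter (fun c => decide (c ≠ ""))) (fun x => x) false).head?
      else none)
    = pvMn l := by
  cases hl : l.filter (fun c => decide (c ≠ "")) with
  | nil =>
    simp only [pvMn]
    rw [hl, if_neg (by simp)]
    rfl
  | cons x t =>
    rw [if_pos (by simp), show pvMn l = ((x :: t).min?) by rw [pvMn, hl]]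
    cases hsort : PySem.List.sorted (x :: t) (fun x => x) false with
    | nil => exact absurd ((PySem.List.sorted_eq_nil_iff _ _ _).mp hsort) (by simp)
    | cons m rest =>
      rw [List.head?_cons]
      have hmmem : m ∈ (x :: t) := by
        rw [← PySem.List.mem_sorted (x :: t) (fun x => x) false, hsort]
        simp
      have hmle : ∀ y ∈ (x :: t), m ≤ y :=
        PySem.List.key_head_sorted_le (x :: t) (fun x => x) hsort
      have hminfold : PySem.List.min? (x :: t) (fun y => y) = some (t.foldl min x) :=
        PySem.List.min?_id_cons x t
      have hfmem : t.foldl min x ∈ (x :: t) := PySem.List.min?_mem hminfold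
      have hfmin : ∀ y ∈ (x :: t), t.foldl min x ≤ y := PySem.List.min?_isMin hminfold
      have : (x :: t).min? = some (t.foldl min x) := rfl
      rw [this, le_antisymm (hmle _ hfmem) (hfmin m hmmem)]


-- ===== VERDICT (by name: the statement is the Claim_ definition above) =====
theorem pick_min_fixed_py_spec : Claim_equal_pick_min_fixed_py := by
  intro ao _
  unfold Spec_pick_min_fixed_py
  simp only [pick_min_fixed_py, pick_min_fixed_py_alt]
  generalize (match (PySem.Dict.mk ao).get? "ranges" with
    | none => ([] : List (List (String × List (List (String × String)))))
    | some l => if l = [] then [] else l) = ranges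
  rw [pv_outerA, pv_rangesMin, List.nil_append, pv_sorted_head]
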